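-- pv_equiv track=rewrite | github.com/cshen/pypy | pypy/translator/cli/support.py | string_literal
-- ===== SOURCE A (Python) =====
-- def string_literal(s):
--     def char_repr(c):
--         if c in '\\"': return '\\' + c
--         if ' ' <= c < '\x7F': return c
--         if c == '\n': return '\\n'
--         if c == '\t': return '\\t'
--         raise ValueError
--     def line_repr(s):
--         return ''.join([char_repr(c) for c in s])
--     def array_repr(s):
--         return ' '.join(['%x 00' % ord(c) for c in s]+['00'])
--
--     try:
--         return '"%s"' % line_repr(s)
--     except ValueError:
--         return "bytearray ( %s )" % array_repr(s)
-- ===== SOURCE B (Python) =====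
-- def string_literal(s):
--     def ok(c):
--         return c in '\\"' or ' ' <= c < '\x7F' or c in '\n\t'
--     def esc(c):
--         if c in '\\"': return '\\' + c
--         if c == '\n': return '\\n'
--         if c == '\t': return '\\t'
--         return c
--     if all(ok(c) for c in s):
--         return '"' + ''.join(esc(c) for c in s) + '"'
--     return 'bytearray ( %s00 )' % ''.join('%x 00 ' % ord(c) for c in s)
-- ===== Notes on version B (the rewrite author's own statement) =====
-- stated objective: simpler
-- what changed: Replaces the optimistic build-and-catch-ValueError strategy with a validate-first decomposition: an explicit representability predicate checked up front, then either the escaped quoted literal or the bytearray form is built, with no exception control flow.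
import Mathlib
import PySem

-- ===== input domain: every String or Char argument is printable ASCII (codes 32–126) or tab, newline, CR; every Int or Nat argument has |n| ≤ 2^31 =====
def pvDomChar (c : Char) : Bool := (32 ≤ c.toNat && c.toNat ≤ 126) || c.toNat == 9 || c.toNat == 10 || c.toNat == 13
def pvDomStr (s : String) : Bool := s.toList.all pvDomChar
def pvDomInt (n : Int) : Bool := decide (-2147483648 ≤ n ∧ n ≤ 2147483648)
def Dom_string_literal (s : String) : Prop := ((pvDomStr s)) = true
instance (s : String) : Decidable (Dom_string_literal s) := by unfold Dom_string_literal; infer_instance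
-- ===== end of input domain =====

-- B replaces A's optimistic build-and-catch-ValueError with a validate-first branch (predicate, then format); same return value everywhere.

-- '%x' for a character code; exact for n < 256 (codes here are ≤ 0x10FFFF but Dom keeps them ≤ 126)
def pvHexDigit (n : Nat) : Char := Char.ofNat (if n < 10 then 48 + n else 87 + n)
def pvHex (n : Nat) : List Char := if n < 16 then [pvHexDigit n] else [pvHexDigit (n / 16), pvHexDigit (n % 16)]

-- ===== PORT A =====
-- char_repr: the four branches in Python's order; 'raise ValueError' is none
def pvCharRepr (c : Char) : Option (List Char) :=
  if c = '\\' ∨ c = '"' then some ['\\', c]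
  else if 32 ≤ c.toNat ∧ c.toNat < 127 then some [c]
  else if c = '\n' then some ['\\', 'n']
  else if c = '\t' then some ['\\', 't']
  else none

-- line_repr: ''.join of the per-char pieces, none as soon as char_repr raises
def pvLineRepr : List Char → Option (List Char)
  | [] => some []
  | c :: t =>
    match pvCharRepr c, pvLineRepr t with
    | some a, some b => some (a ++ b)
    | _, _ => none

-- array_repr: ' '.join(['%x 00' % ord(c) for c in s] + ['00'])
def pvArrayRepr (l : List Char) : List Char :=
  PySem.Chars.join [' '] (l.map (fun c => pvHex c.toNat ++ " 00".toList) ++ ["00".toList])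

def string_literal (s : String) : String :=
  String.mk
    (match pvLineRepr s.toList with
     | some r => '"' :: r ++ ['"']
     | none => "bytearray ( ".toList ++ pvArrayRepr s.toList ++ " )".toList)

-- ===== PORT B =====
-- ok: c is representable in a quoted literal
def pvOkChar (c : Char) : Bool :=
  (c = '\\' || c = '"') || (32 ≤ c.toNat && c.toNat < 127) || c = '\n' || c = '\t'

-- esc: escaping for an ok character
def pvEscChar (c : Char) : List Char :=
  if c = '\\' ∨ c = '"' then ['\\', c]
  else if c = '\n' then ['\\', 'n']
  else if c = '\t' then ['\\', 't']
  else [c]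

def string_literal_alt (s : String) : String :=
  String.mk
    (if s.toList.all pvOkChar then
       '"' :: s.toList.flatMap pvEscChar ++ ['"']
     else
       "bytearray ( ".toList ++ s.toList.flatMap (fun c => pvHex c.toNat ++ " 00 ".toList) ++ "00 )".toList)

-- ===== PRECONDITION & SPEC =====
def Spec_string_literal (s : String) (out : String) : Prop := out = string_literal_alt s
instance (s : String) (out : String) : Decidable (Spec_string_literal s out) := by unfold Spec_string_literal; infer_instance

-- ===== CLAIM (what is proved, stated in full; the proofs are below) =====
def Claim_equal_string_literal : Prop := ∀ (s : String), Dom_string_literal s → Spec_string_literal s (string_literal s)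

-- ===== LEMMAS AND PROOFS =====
theorem charRepr_eq (c : Char) :
    pvCharRepr c = if pvOkChar c then some (pvEscChar c) else none := by
  unfold pvCharRepr pvOkChar pvEscChar
  by_cases h1 : c = '\\' ∨ c = '"'
  · simp [h1]
  · by_cases h2 : 32 ≤ c.toNat ∧ c.toNat < 127
    · rcases h2 with ⟨ha, hb⟩
      have hn : ¬ c = '\n' := by rintro rfl; simp [Char.toNat] at ha
      have ht : ¬ c = '\t' := by rintro rfl; simp [Char.toNat] at ha
      simp [h1, ha, hb, hn, ht]
    · by_cases h3 : c = '\n'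
      · simp [h3]
      · by_cases h4 : c = '\t'
        · subst h4; decide
        · simp [h1, h2, h3, h4]

theorem lineRepr_eq (l : List Char) :
    pvLineRepr l = if l.all pvOkChar then some (l.flatMap pvEscChar) else none := by
  induction l with
  | nil => simp [pvLineRepr]
  | cons c t ih =>
    simp only [pvLineRepr, ih, charRepr_eq]
    by_cases hc : pvOkChar c <;> by_cases ht : t.all pvOkChar <;>
      simp [hc, ht, List.all_cons]

theorem join_append_last (z : List Char) (L : List (List Char)) :
    PySem.Chars.join [' '] (L ++ [z]) = (L.map (· ++ [' '])).flatten ++ z := by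
  induction L with
  | nil => simp [PySem.Chars.join_singleton]
  | cons a L ih =>
    cases L with
    | nil => simp [PySem.Chars.join_cons_cons, PySem.Chars.join_singleton]
    | cons b M =>
      simp only [List.cons_append, PySem.Chars.join_cons_cons] at ih ⊢
      simp [ih]

theorem arrayRepr_eq (l : List Char) :
    pvArrayRepr l ++ " )".toList
      = l.flatMap (fun c => pvHex c.toNat ++ " 00 ".toList) ++ "00 )".toList := by
  unfold pvArrayRepr
  rw [join_append_last]
  rw [List.map_map, List.flatten_eq_flatMap, List.flatMap_map]
  simp [List.append_assoc]

-- ===== VERDICT (by name: the statement is the Claim_ definition above) =====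
theorem string_literal_spec : Claim_equal_string_literal := by
  intro s _
  show string_literal s = string_literal_alt s
  unfold string_literal string_literal_alt
  rw [lineRepr_eq]
  by_cases h : s.toList.all pvOkChar
  · simp [h]
  · simp only [h, Bool.false_eq_true, if_false]
    rw [List.append_assoc, arrayRepr_eq, ← List.append_assoc]
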